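-- pv_equiv track=rewrite | github.com/House1904/Final_Project_AI | solvers/csp_solver.py | validate_fill
-- ===== SOURCE A (Python) =====
-- def validate_fill(assignments, ROWS, COLS):
--     grid = [[None for _ in range(COLS)] for _ in range(ROWS)]
--     for color, path in assignments.items():
--         for r, c in path:
--             if grid[r][c] is not None:
--                 return False
--             grid[r][c] = color
--
--     for r in range(ROWS):
--         for c in range(COLS):
--             if grid[r][c] is None:
--                 return False
--     return True
-- ===== SOURCE B (Python) =====
-- def validate_fill(assignments, ROWS, COLS):
--     grid = [[None for _ in range(COLS)] for _ in range(ROWS)]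
--     remaining = sum(len(row) for row in grid)
--     cells = [(color, r, c) for color, path in assignments.items() for r, c in path]
--     for color, r, c in cells:
--         if grid[r][c] is not None:
--             return False
--         grid[r][c] = color
--         remaining -= 1
--     return remaining == 0
-- ===== Notes on version B (the rewrite author's own statement) =====
-- stated objective: simpler
-- what changed: B flattens the nested per-color fill into one loop over a flattened (color,r,c) list and, counting placements against the grid's cell total, drops A's second nested ROWS x COLS coverage scan entirely: one pass instead of two.
-- outside the precondition, e.g. on validate_fill({'a': [(0, 0), (0, 0), (5, 5)]}, 2, 2): A returns False, B returns False
import Mathlib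
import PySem

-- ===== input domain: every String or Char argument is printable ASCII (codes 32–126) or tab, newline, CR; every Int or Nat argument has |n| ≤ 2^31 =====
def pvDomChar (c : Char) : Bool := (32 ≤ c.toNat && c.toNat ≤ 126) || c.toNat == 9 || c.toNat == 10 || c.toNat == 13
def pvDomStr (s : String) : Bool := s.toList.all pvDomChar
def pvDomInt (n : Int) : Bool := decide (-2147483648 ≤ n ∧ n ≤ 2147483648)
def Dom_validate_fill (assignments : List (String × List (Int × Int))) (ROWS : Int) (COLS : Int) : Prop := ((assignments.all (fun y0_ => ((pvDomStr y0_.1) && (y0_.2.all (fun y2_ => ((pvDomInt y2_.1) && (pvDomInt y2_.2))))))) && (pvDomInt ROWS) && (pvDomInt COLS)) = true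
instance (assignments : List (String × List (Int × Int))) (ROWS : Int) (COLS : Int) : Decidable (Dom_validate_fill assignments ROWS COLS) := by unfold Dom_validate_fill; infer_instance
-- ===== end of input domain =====

-- B replaces A's second nested ROWS×COLS coverage scan by a placement counter checked against the
-- grid's cell total, and flattens the nested per-color fill into one loop over a flattened cell list
-- (objective: simpler — one pass instead of two).

-- ===== PORT A =====
-- grid = [[None for _ in range(COLS)] for _ in range(ROWS)]
def pvGridA (ROWS COLS : Int) : List (List (Option String)) :=
  (PySem.List.pyRange 0 ROWS 1).map (fun _ =>
    (PySem.List.pyRange 0 COLS 1).map (fun _ => (none : Option String)))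

-- the body of A's inner fill loop: `none` is both IndexError (outside Pre_) and `return False`
def pvPlaceA (g : List (List (Option String))) (color : String) (r c : Int) :
    Option (List (List (Option String))) :=
  match PySem.List.pyGet? g r with
  | none => none                               -- IndexError on grid[r]
  | some row =>
    match PySem.List.pyGet? row c with
    | none => none                             -- IndexError on row[c]
    | some cell =>
      match cell with
      | some _ => none                         -- 'if grid[r][c] is not None: return False'
      | none => some (PySem.List.pySetD g r (PySem.List.pySetD row c (some color)))

-- 'for r, c in path:'
def pvFillPathA (g : List (List (Option String))) (color : String) :
    List (Int × Int) → Option (List (List (Option String)))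
  | [] => some g
  | (r, c) :: rest =>
    match pvPlaceA g color r c with
    | none => none
    | some g' => pvFillPathA g' color rest

-- 'for color, path in assignments.items():'
def pvFillA (g : List (List (Option String))) :
    List (String × List (Int × Int)) → Option (List (List (Option String)))
  | [] => some g
  | (color, path) :: rest =>
    match pvFillPathA g color path with
    | none => none
    | some g' => pvFillA g' rest

def validate_fill (assignments : List (String × List (Int × Int))) (ROWS : Int) (COLS : Int) : Bool :=
  match pvFillA (pvGridA ROWS COLS) assignments with
  | none => false
  | some g =>
    -- 'for r in range(ROWS): for c in range(COLS): if grid[r][c] is None: return False' / 'return True'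
    (PySem.List.pyRange 0 ROWS 1).all (fun r =>
      (PySem.List.pyRange 0 COLS 1).all (fun c =>
        !(PySem.List.pyGetD (PySem.List.pyGetD g r []) c none).isNone))

-- ===== PORT B =====
-- grid = [[None for _ in range(COLS)] for _ in range(ROWS)]
def pvGridB (ROWS COLS : Int) : List (List (Option String)) :=
  (PySem.List.pyRange 0 ROWS 1).map (fun _ =>
    (PySem.List.pyRange 0 COLS 1).map (fun _ => (none : Option String)))

-- cells = [(color, r, c) for color, path in assignments.items() for r, c in path]
def pvCellsB (assignments : List (String × List (Int × Int))) : List (String × Int × Int) :=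
  assignments.flatMap (fun cp => cp.2.map (fun rc => (cp.1, rc.1, rc.2)))

-- 'for color, r, c in cells:', threading the remaining counter; some k = the loop finished
def pvLoopB (g : List (List (Option String))) (k : Int) :
    List (String × Int × Int) → Option Int
  | [] => some k
  | (color, r, c) :: rest =>
    match PySem.List.pyGet? g r with
    | none => none                             -- IndexError on grid[r]
    | some row =>
      match PySem.List.pyGet? row c with
      | none => none                           -- IndexError on row[c]
      | some cell =>
        match cell with
        | some _ => none                       -- 'if grid[r][c] is not None: return False'
        | none =>
          pvLoopB (PySem.List.pySetD g r (PySem.List.pySetD row c (some color))) (k - 1) rest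

def validate_fill_alt (assignments : List (String × List (Int × Int))) (ROWS : Int) (COLS : Int) : Bool :=
  -- remaining = sum(len(row) for row in grid), then the single loop, then 'return remaining == 0'
  match pvLoopB (pvGridB ROWS COLS) ((pvGridB ROWS COLS).map (fun row => PySem.List.len row)).sum
      (pvCellsB assignments) with
  | none => false
  | some k => k == 0

-- ===== PRECONDITION & SPEC =====
-- Pre_ excludes exactly the inputs whose fill loop reaches an out-of-range coordinate: there the
-- shared fill loop of A and of B raises IndexError (except when an earlier overlap already returned
-- False — those excluded inputs get the same False from both programs; see the cite in claim.json).
def Pre_validate_fill (assignments : List (String × List (Int × Int))) (ROWS : Int) (COLS : Int) : Prop :=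
  ∀ cp ∈ assignments, ∀ rc ∈ cp.2,
    -ROWS ≤ rc.1 ∧ rc.1 < ROWS ∧ -COLS ≤ rc.2 ∧ rc.2 < COLS

instance (assignments : List (String × List (Int × Int))) (ROWS : Int) (COLS : Int) : Decidable (Pre_validate_fill assignments ROWS COLS) := by unfold Pre_validate_fill; infer_instance

def pvWitness_validate_fill : (List (String × List (Int × Int))) × Int × Int :=
  ([("a", [(0, 0), (0, 1)])], 1, 2)

def Spec_validate_fill (assignments : List (String × List (Int × Int))) (ROWS : Int) (COLS : Int) (out : Bool) : Prop := out = validate_fill_alt assignments ROWS COLS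
instance (assignments : List (String × List (Int × Int))) (ROWS : Int) (COLS : Int) (out : Bool) : Decidable (Spec_validate_fill assignments ROWS COLS out) := by unfold Spec_validate_fill; infer_instance

-- ===== CLAIM (what is proved, stated in full; the proofs are below) =====
def Claim_equal_validate_fill : Prop := ∀ (assignments : List (String × List (Int × Int))) (ROWS : Int) (COLS : Int), Dom_validate_fill assignments ROWS COLS → Pre_validate_fill assignments ROWS COLS → Spec_validate_fill assignments ROWS COLS (validate_fill assignments ROWS COLS)

-- ===== LEMMAS AND PROOFS =====

-- total number of still-empty cells of a grid
def pvNoneCount (g : List (List (Option String))) : Nat :=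
  (g.map (fun row => row.countP (fun cell => cell.isNone))).sum

-- proof-side flattened form of A's nested fill loops
def pvFillFlat (g : List (List (Option String))) :
    List (String × Int × Int) → Option (List (List (Option String)))
  | [] => some g
  | (color, r, c) :: rest =>
    match pvPlaceA g color r c with
    | none => none
    | some g' => pvFillFlat g' rest

theorem pvIdx_in_range {n : Nat} {i : Int} (h1 : -(n : Int) ≤ i) (h2 : i < n) :
    PySem.List.pyIdx? n i = some (if i < 0 then i + n else i).toNat := by
  simp only [PySem.List.pyIdx?]
  split_ifs <;> first | omega | exact congrArg some (by omega)

theorem pvGetSet {α : Type} (xs : List α) (i : Int)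
    (h1 : -(xs.length : Int) ≤ i) (h2 : i < xs.length) :
    ∃ j : Nat, ∃ hj : j < xs.length, PySem.List.pyGet? xs i = some (xs[j]'hj) ∧
      ∀ v, PySem.List.pySetD xs i v = xs.set j v := by
  refine ⟨(if i < 0 then i + xs.length else i).toNat, by split_ifs <;> omega, ?_, ?_⟩
  · simp [PySem.List.pyGet?, pvIdx_in_range h1 h2]
  · intro v
    simp [PySem.List.pySetD, PySem.List.pySet?, pvIdx_in_range h1 h2]

theorem pvSumSet (l : List Nat) (j : Nat) (a : Nat) (h : j < l.length) :
    (l.set j a).sum + l[j] = l.sum + a := by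
  induction l generalizing j with
  | nil => simp at h
  | cons x t ih =>
    cases j with
    | zero => simp [List.set]; omega
    | succ j =>
      simp only [List.set, List.sum_cons, List.getElem_cons_succ]
      have := ih j (by simpa using h)
      omega

theorem pvPlaceA_some {g g' : List (List (Option String))} {color : String} {r c R C : Int}
    (hg : g.length = R.toNat) (hrow : ∀ row ∈ g, row.length = C.toNat)
    (hb : -R ≤ r ∧ r < R ∧ -C ≤ c ∧ c < C)
    (h : pvPlaceA g color r c = some g') :
    g'.length = R.toNat ∧ (∀ row ∈ g', row.length = C.toNat) ∧
      pvNoneCount g' + 1 = pvNoneCount g := by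
  obtain ⟨hr1, hr2, hc1, hc2⟩ := hb
  obtain ⟨j, hj, hjget, hjset⟩ := pvGetSet g r (by omega) (by omega)
  have hrowlen : g[j].length = C.toNat := hrow _ (List.getElem_mem hj)
  obtain ⟨i, hi, higet, hiset⟩ := pvGetSet g[j] c (by omega) (by omega)
  simp only [pvPlaceA, hjget, higet] at h
  rcases hcell : g[j][i] with _ | v
  · rw [hcell] at h
    simp only [Option.some.injEq] at h
    subst h
    rw [hjset, hiset]
    refine ⟨by simpa using hg, ?_, ?_⟩
    · intro row hmem
      rcases List.mem_or_eq_of_mem_set hmem with hm | hm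
      · exact hrow _ hm
      · subst hm; simpa using hrowlen
    · simp only [pvNoneCount, List.map_set]
      have hrcount : (g[j].set i (some color)).countP (fun cell => cell.isNone) + 1
          = g[j].countP (fun cell => cell.isNone) := by
        rw [List.countP_set hi, hcell]
        have : 0 < g[j].countP (fun cell => cell.isNone) := by
          rw [List.countP_pos_iff]
          exact ⟨none, by rw [← hcell]; exact List.getElem_mem hi, rfl⟩
        simp
        omega
      have hsum := pvSumSet (g.map (fun row => row.countP (fun cell => cell.isNone))) j
        ((g[j].set i (some color)).countP (fun cell => cell.isNone)) (by simpa using hj)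
      rw [List.getElem_map] at hsum
      omega
  · rw [hcell] at h
    simp at h

theorem pvLoopB_cons (g : List (List (Option String))) (k : Int) (color : String) (r c : Int)
    (rest : List (String × Int × Int)) :
    pvLoopB g k ((color, r, c) :: rest)
      = match pvPlaceA g color r c with
        | none => none
        | some g' => pvLoopB g' (k - 1) rest := by
  cases hg : PySem.List.pyGet? g r with
  | none => simp [pvLoopB, pvPlaceA, hg]
  | some row =>
    cases hc : PySem.List.pyGet? row c with
    | none => simp [pvLoopB, pvPlaceA, hg, hc]
    | some cell => cases cell <;> simp [pvLoopB, pvPlaceA, hg, hc]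

theorem pvFill_rel (R C : Int) :
    ∀ (cells : List (String × Int × Int)) (g : List (List (Option String))) (k : Int),
    g.length = R.toNat → (∀ row ∈ g, row.length = C.toNat) →
    (∀ t ∈ cells, -R ≤ t.2.1 ∧ t.2.1 < R ∧ -C ≤ t.2.2 ∧ t.2.2 < C) →
    pvLoopB g k cells
        = (pvFillFlat g cells).map (fun g' => k - (pvNoneCount g : Int) + (pvNoneCount g' : Int)) ∧
      (∀ g', pvFillFlat g cells = some g' →
        g'.length = R.toNat ∧ ∀ row ∈ g', row.length = C.toNat) := by
  intro cells
  induction cells with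
  | nil =>
    intro g k hg hrow _
    refine ⟨by simp only [pvLoopB, pvFillFlat, Option.map_some, Option.some.injEq]; omega, ?_⟩
    intro g' h
    simp only [pvFillFlat, Option.some.injEq] at h
    subst h
    exact ⟨hg, hrow⟩
  | cons t rest ih =>
    obtain ⟨color, r, c⟩ := t
    intro g k hg hrow hb
    rw [pvLoopB_cons]
    rcases hp : pvPlaceA g color r c with _ | g'
    · constructor
      · simp [pvFillFlat, hp]
      · intro g'' h
        simp [pvFillFlat, hp] at h
    · have hbt := hb _ (List.mem_cons_self ..)
      obtain ⟨hlen', hrow', hcnt⟩ := pvPlaceA_some hg hrow hbt hp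
      obtain ⟨ihe, ihs⟩ := ih g' (k - 1) hlen' hrow'
        (fun t ht => hb _ (List.mem_cons_of_mem _ ht))
      constructor
      · simp only [pvFillFlat, hp, ihe]
        rcases pvFillFlat g' rest with _ | g''
        · simp
        · simp only [Option.map_some, Option.some.injEq]
          omega
      · intro g'' h
        simp only [pvFillFlat, hp] at h
        exact ihs _ h

theorem pvFillPathA_flat (color : String) :
    ∀ (path : List (Int × Int)) (g : List (List (Option String)))
      (rest : List (String × Int × Int)),
    pvFillFlat g (path.map (fun rc => (color, rc.1, rc.2)) ++ rest)
      = match pvFillPathA g color path with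
        | none => none
        | some g' => pvFillFlat g' rest := by
  intro path
  induction path with
  | nil => intro g rest; rfl
  | cons rc t ih =>
    intro g rest
    obtain ⟨r, c⟩ := rc
    simp only [List.map_cons, List.cons_append, pvFillFlat, pvFillPathA]
    rcases pvPlaceA g color r c with _ | g'
    · rfl
    · exact ih g' rest

theorem pvFillA_flat :
    ∀ (items : List (String × List (Int × Int))) (g : List (List (Option String))),
    pvFillFlat g (pvCellsB items) = pvFillA g items := by
  intro items
  induction items with
  | nil => intro g; rfl
  | cons cp rest ih =>
    intro g
    obtain ⟨color, path⟩ := cp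
    simp only [pvCellsB, List.flatMap_cons, pvFillA]
    rw [pvFillPathA_flat]
    rcases pvFillPathA g color path with _ | g'
    · rfl
    · exact ih g'

theorem pvGridA_length (R C : Int) : (pvGridA R C).length = R.toNat := by
  simp [pvGridA, PySem.List.length_pyRange_one]

theorem pvGridA_rows (R C : Int) : ∀ row ∈ pvGridA R C, row.length = C.toNat := by
  intro row hmem
  simp only [pvGridA, List.mem_map] at hmem
  obtain ⟨_, _, rfl⟩ := hmem
  simp [PySem.List.length_pyRange_one]

theorem pvGridA_noneCount (R C : Int) :
    ((pvGridA R C).map (fun row => PySem.List.len row)).sum = (pvNoneCount (pvGridA R C) : Int) := by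
  simp only [pvNoneCount]
  rw [Nat.cast_list_sum]
  simp only [List.map_map, Function.comp_def, PySem.List.len_eq]
  congr 1
  refine List.map_congr_left (fun x hx => ?_)
  simp only [pvGridA, List.mem_map] at hx
  obtain ⟨_, _, rfl⟩ := hx
  simp [List.countP_replicate]

theorem pvAllRangeGetD {β : Type} (l : List β) (f : β → Bool) (d : β) :
    (List.range l.length).all (fun k => f (l.getD k d)) = l.all f := by
  induction l with
  | nil => rfl
  | cons x t ih =>
    rw [List.length_cons, List.range_succ_eq_map, List.all_cons, List.all_map, List.all_cons]
    congr 1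

theorem pvScan_eq {g : List (List (Option String))} {R C : Int}
    (hg : g.length = R.toNat) (hrow : ∀ row ∈ g, row.length = C.toNat) :
    ((PySem.List.pyRange 0 R 1).all (fun r =>
      (PySem.List.pyRange 0 C 1).all (fun c =>
        !(PySem.List.pyGetD (PySem.List.pyGetD g r []) c none).isNone)))
      = decide (pvNoneCount g = 0) := by
  have hrange : ∀ (n : Int), PySem.List.pyRange 0 n 1 = (List.range n.toNat).map (fun k : Nat => (k : Int)) := by
    intro n
    rw [PySem.List.pyRange_one]
    simp only [sub_zero, zero_add]
  have hstep : ∀ row ∈ g,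
      (PySem.List.pyRange 0 C 1).all (fun c => !(PySem.List.pyGetD row c none).isNone)
        = row.all (fun cell => !cell.isNone) := by
    intro row hmem
    rw [hrange, List.all_map]
    simp only [Function.comp_def, PySem.List.pyGetD_natCast]
    rw [← hrow row hmem]
    exact pvAllRangeGetD row (fun cell => !cell.isNone) none
  rw [hrange, List.all_map]
  simp only [Function.comp_def, PySem.List.pyGetD_natCast]
  rw [← hg, pvAllRangeGetD g
    (fun row => (PySem.List.pyRange 0 C 1).all (fun c => !(PySem.List.pyGetD row c none).isNone)) []]
  by_cases hz : pvNoneCount g = 0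
  · simp only [hz, decide_true]
    rw [List.all_eq_true]
    intro row hmem
    rw [hstep row hmem, List.all_eq_true]
    intro cell hcell
    simp only [pvNoneCount, List.sum_eq_zero_iff] at hz
    have := hz _ (List.mem_map_of_mem hmem)
    rw [List.countP_eq_zero] at this
    simpa [Option.isSome_iff_ne_none] using this cell hcell
  · simp only [hz, decide_false]
    rw [Bool.eq_false_iff, Ne, List.all_eq_true]
    intro hall
    apply hz
    simp only [pvNoneCount, List.sum_eq_zero_iff]
    intro n hn
    rw [List.mem_map] at hn
    obtain ⟨row, hmem, rfl⟩ := hn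
    rw [List.countP_eq_zero]
    intro cell hcell
    have := hall row hmem
    rw [hstep row hmem, List.all_eq_true] at this
    simpa [Option.isSome_iff_ne_none] using this cell hcell

-- ===== VERDICT (by name: the statement is the Claim_ definition above) =====
theorem validate_fill_spec : Claim_equal_validate_fill := by
  intro assignments ROWS COLS _ hpre
  unfold Spec_validate_fill validate_fill validate_fill_alt
  have hgB : pvGridB ROWS COLS = pvGridA ROWS COLS := rfl
  rw [hgB, pvGridA_noneCount]
  have hcells : ∀ t ∈ pvCellsB assignments,
      -ROWS ≤ t.2.1 ∧ t.2.1 < ROWS ∧ -COLS ≤ t.2.2 ∧ t.2.2 < COLS := by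
    intro t ht
    simp only [pvCellsB, List.mem_flatMap, List.mem_map] at ht
    obtain ⟨cp, hcp, rc, hrc, rfl⟩ := ht
    exact hpre cp hcp rc hrc
  obtain ⟨heq, hshape⟩ := pvFill_rel ROWS COLS (pvCellsB assignments) (pvGridA ROWS COLS)
    (pvNoneCount (pvGridA ROWS COLS) : Int)
    (pvGridA_length ROWS COLS) (pvGridA_rows ROWS COLS) hcells
  rw [heq, ← pvFillA_flat]
  rcases hf : pvFillFlat (pvGridA ROWS COLS) (pvCellsB assignments) with _ | g'
  · rfl
  · obtain ⟨hlen', hrow'⟩ := hshape g' hf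
    simp only [Option.map_some]
    rw [pvScan_eq hlen' hrow']
    have : ((pvNoneCount (pvGridA ROWS COLS) : Int) - (pvNoneCount (pvGridA ROWS COLS) : Int)
        + (pvNoneCount g' : Int)) = (pvNoneCount g' : Int) := by omega
    rw [this]
    by_cases hz : pvNoneCount g' = 0 <;> simp [hz]
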